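-- pv_equiv track=rewrite | github.com/Telepact/telepact | lib/py/telepact/internal/schema/GetPathDocumentYamlCoordinatesPseudoJson.py | _trim_comment
-- ===== SOURCE A (Python) =====
-- def _trim_comment(text: str) -> str:
--     quote: str | None = None
--     for index, char in enumerate(text):
--         if char in ('"', "'"):
--             quote = None if quote == char else (char if quote is None else quote)
--             continue
--         if quote is None and char == '#':
--             return text[:index].rstrip()
--     return text.rstrip()
-- ===== SOURCE B (Python) =====
-- import re
--
-- _TOKEN = re.compile(r"'[^']*'?|\"[^\"]*\"?|#")
--
-- def _trim_comment(text: str) -> str: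
--     for m in _TOKEN.finditer(text):
--         if m.group() == '#':
--             return text[:m.start()].rstrip()
--     return text.rstrip()
-- ===== Notes on version B (the rewrite author's own statement) =====
-- stated objective: idiomatic
-- what changed: Replaces the per-character quote-state loop with a compiled regex tokenizer (finditer over quoted-segment-or-hash tokens, an optional closing quote letting an unclosed quote run to end of string) that truncates at the first hash token.
import Mathlib
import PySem

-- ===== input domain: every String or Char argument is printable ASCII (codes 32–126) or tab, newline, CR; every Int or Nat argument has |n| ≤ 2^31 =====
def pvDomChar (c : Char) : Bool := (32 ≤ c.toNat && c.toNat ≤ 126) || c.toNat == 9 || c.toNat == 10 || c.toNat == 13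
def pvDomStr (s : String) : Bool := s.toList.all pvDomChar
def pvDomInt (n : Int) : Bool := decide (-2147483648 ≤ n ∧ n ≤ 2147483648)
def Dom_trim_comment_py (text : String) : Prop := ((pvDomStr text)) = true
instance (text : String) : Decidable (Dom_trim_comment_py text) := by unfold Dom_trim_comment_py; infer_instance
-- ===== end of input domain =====

-- B replaces A's per-character quote-state loop by a regex-style tokenizer that consumes
-- whole quoted segments at once (objective: idiomatic; same return value, no side effects).

-- ===== PORT A =====
-- literal port of A's for-loop over enumerate(text) with the quote state
def trimALoop (text : String) : List (Int × Char) → Option Char → String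
  | [], _ => PySem.Str.rstrip text
  | (index, char) :: rest, quote =>
    if char = '"' ∨ char = '\'' then
      trimALoop text rest
        (if quote = some char then none else if quote = none then some char else quote)
    else if quote = none ∧ char = '#' then
      PySem.Str.rstrip (PySem.Str.slice text none (some index))
    else trimALoop text rest quote

def trim_comment_py (text : String) : String :=
  trimALoop text (PySem.List.enumerate text.toList 0) none

-- ===== PORT B =====
-- hand port of the regex token r"'[^']*'?|\"[^\"]*\"?|#" consumed by finditer:
-- a quoted token runs from its opening quote to the next same quote (or end of string);
-- bSkip consumes the rest of such a token, bFind returns the start of the first '#' token.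
def bSkip (q : Char) : List Char → Int → Int × List Char
  | [], i => (i, [])
  | c :: rest, i => if c = q then (i + 1, rest) else bSkip q rest (i + 1)

theorem bSkip_len (q : Char) : ∀ (cs : List Char) (i : Int), (bSkip q cs i).2.length ≤ cs.length := by
  intro cs
  induction cs with
  | nil => intro i; simp [bSkip]
  | cons c rest ih =>
    intro i
    by_cases h : c = q
    · simp [bSkip, h]
    · simpa [bSkip, h] using Nat.le_succ_of_le (ih (i + 1))

def bFind : List Char → Int → Option Int
  | [], _ => none
  | c :: rest, i =>
    if c = '#' then some i
    else if c = '\'' ∨ c = '"' then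
      bFind (bSkip c rest (i + 1)).2 (bSkip c rest (i + 1)).1
    else bFind rest (i + 1)
termination_by cs _ => cs.length
decreasing_by
  · exact Nat.lt_succ_of_le (bSkip_len c rest (i + 1))
  · simp

def trim_comment_py_alt (text : String) : String :=
  match bFind text.toList 0 with
  | some i => PySem.Str.rstrip (PySem.Str.slice text none (some i))
  | none => PySem.Str.rstrip text

-- ===== PRECONDITION & SPEC =====
def Spec_trim_comment_py (text : String) (out : String) : Prop := out = trim_comment_py_alt text
instance (text : String) (out : String) : Decidable (Spec_trim_comment_py text out) := by unfold Spec_trim_comment_py; infer_instance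

-- ===== CLAIM (what is proved, stated in full; the proofs are below) =====
def Claim_equal_trim_comment_py : Prop := ∀ (text : String), Dom_trim_comment_py text → Spec_trim_comment_py text (trim_comment_py text)

-- ===== LEMMAS AND PROOFS =====

theorem trimALoop_cons (text : String) (i : Int) (c : Char) (rest : List (Int × Char))
    (quote : Option Char) :
    trimALoop text ((i, c) :: rest) quote =
      if c = '"' ∨ c = '\'' then
        trimALoop text rest
          (if quote = some c then none else if quote = none then some c else quote)
      else if quote = none ∧ c = '#' then
        PySem.Str.rstrip (PySem.Str.slice text none (some i))
      else trimALoop text rest quote := rfl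

-- inside a quote q, A's loop skips everything until the closing q — exactly what bSkip consumes
theorem skip_agree (text : String) (q : Char) (hq : q = '"' ∨ q = '\'') :
    ∀ (cs : List Char) (i : Int),
      trimALoop text (PySem.List.enumerate cs i) (some q) =
        trimALoop text (PySem.List.enumerate (bSkip q cs i).2 (bSkip q cs i).1) none := by
  intro cs
  induction cs with
  | nil => intro i; simp [bSkip, PySem.List.enumerate_nil, trimALoop]
  | cons c rest ih =>
    intro i
    rw [PySem.List.enumerate_cons]
    by_cases hc : c = q
    · subst hc
      simp [trimALoop_cons, hq, bSkip]
    · have hbs : bSkip q (c :: rest) i = bSkip q rest (i + 1) := by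
        simp [bSkip, hc]
      by_cases hcq : c = '"' ∨ c = '\''
      · have hne : ¬ (some q : Option Char) = some c := by
          intro h; exact hc (Option.some.inj h).symm
        rw [trimALoop_cons, if_pos hcq, if_neg hne,
          if_neg (show ¬ (some q : Option Char) = none by simp), ih (i + 1), hbs]
      · have h2 : ¬ ((some q : Option Char) = none ∧ c = '#') := by simp
        rw [trimALoop_cons, if_neg hcq, if_neg h2, ih (i + 1), hbs]

theorem main_agree (text : String) :
    ∀ (n : Nat) (cs : List Char) (i : Int), cs.length ≤ n →
      trimALoop text (PySem.List.enumerate cs i) none =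
        (match bFind cs i with
         | some j => PySem.Str.rstrip (PySem.Str.slice text none (some j))
         | none => PySem.Str.rstrip text) := by
  intro n
  induction n with
  | zero =>
    intro cs i hlen
    have : cs = [] := List.eq_nil_of_length_eq_zero (Nat.le_zero.mp hlen)
    subst this
    simp [PySem.List.enumerate_nil, trimALoop, bFind]
  | succ n ih =>
    intro cs i hlen
    match cs with
    | [] => simp [PySem.List.enumerate_nil, trimALoop, bFind]
    | c :: rest =>
      have hrest : rest.length ≤ n := Nat.lt_succ_iff.mp (by simpa using hlen)
      rw [PySem.List.enumerate_cons]
      by_cases hcq : c = '"' ∨ c = '\''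
      · have hq' : c = '\'' ∨ c = '"' := hcq.symm
        have hch : c ≠ '#' := by rcases hcq with h | h <;> simp [h]
        have hbf : bFind (c :: rest) i =
            bFind (bSkip c rest (i + 1)).2 (bSkip c rest (i + 1)).1 := by
          rw [bFind]; simp [hch, hq']
        rw [trimALoop_cons, if_pos hcq, if_neg (show ¬ (none : Option Char) = some c by simp),
          if_pos rfl, skip_agree text c hcq rest (i + 1),
          ih _ _ (le_trans (bSkip_len c rest (i + 1)) hrest), hbf]
      · by_cases hch : c = '#'
        · subst hch
          have hbf : bFind ('#' :: rest) i = some i := by rw [bFind]; simp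
          rw [trimALoop_cons, if_neg hcq, if_pos ⟨rfl, rfl⟩, hbf]
        · have hq2 : ¬ (c = '\'' ∨ c = '"') := fun h => hcq (Or.symm h)
          have hbf : bFind (c :: rest) i = bFind rest (i + 1) := by
            rw [bFind]; simp [hch, hq2]
          rw [trimALoop_cons, if_neg hcq,
            if_neg (show ¬ ((none : Option Char) = none ∧ c = '#') by simp [hch]),
            ih rest (i + 1) hrest, hbf]

-- ===== VERDICT (by name: the statement is the Claim_ definition above) =====
theorem trim_comment_py_spec : Claim_equal_trim_comment_py := by
  intro text _
  unfold Spec_trim_comment_py trim_comment_py trim_comment_py_alt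
  exact main_agree text text.toList.length text.toList 0 le_rfl
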